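-- pv_equiv track=rewrite | github.com/pschwinger/empirica | dev_scripts/schema_validator.py | _split_sql_fields
-- ===== SOURCE A (Python) =====
-- from typing import Dict, List, Set, Tuple, Optional
--
-- def _split_sql_fields(text: str) -> List[str]:
--     """Split SQL field definitions respecting parentheses in constraints"""
--     fields = []
--     current_field = ""
--     paren_depth = 0
--     i = 0
--
--     while i < len(text):
--         char = text[i]
--         if char == '(':
--             paren_depth += 1
--             current_field += char
--         elif char == ')':
--             paren_depth -= 1
--             current_field += char
--         elif char == ',' and paren_depth == 0:
--             fields.append(current_field.strip())
--             current_field = ""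
--         else:
--             current_field += char
--         i += 1
--
--     if current_field.strip():
--         fields.append(current_field.strip())
--
--     return fields
-- ===== SOURCE B (Python) =====
-- from typing import List
--
-- def _split_top(s: str) -> List[str]:
--     """Return raw segments of s split at the first depth-0 comma, recursively."""
--     depth = 0
--     for i, ch in enumerate(s):
--         if ch == '(':
--             depth += 1
--         elif ch == ')':
--             depth -= 1
--         elif ch == ',' and depth == 0:
--             return [s[:i]] + _split_top(s[i + 1:])
--     return [s]
--
-- def _split_sql_fields(text: str) -> List[str]:
--     segs = [p.strip() for p in _split_top(text)]
--     return segs if segs[-1] else segs[:-1]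
-- ===== Notes on version B (the rewrite author's own statement) =====
-- stated objective: faster
-- what changed: Replaces A's single while-loop that grows a current-field string one character at a time by a recursive splitter that finds the first depth-0 comma, slices off the prefix whole, recurses on the remainder, then strips all segments and drops the last one only if empty.
import Mathlib
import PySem

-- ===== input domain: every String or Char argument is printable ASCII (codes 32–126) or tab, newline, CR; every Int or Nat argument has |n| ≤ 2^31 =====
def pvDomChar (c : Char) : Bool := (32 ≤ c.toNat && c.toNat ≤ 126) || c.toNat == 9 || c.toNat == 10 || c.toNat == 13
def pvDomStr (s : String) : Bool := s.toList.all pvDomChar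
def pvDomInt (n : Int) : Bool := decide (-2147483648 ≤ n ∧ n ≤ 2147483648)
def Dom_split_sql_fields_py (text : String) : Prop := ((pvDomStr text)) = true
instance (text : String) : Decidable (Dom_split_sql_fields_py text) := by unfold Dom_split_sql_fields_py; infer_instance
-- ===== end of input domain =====

-- B replaces A's char-by-char accumulator loop by a recursive splitter that slices off the
-- whole segment before the first top-level comma and recurses on the rest (objective: faster, measured).


-- ===== PORT A =====
-- the while loop: state = (fields, current_field), plus paren_depth
def splitA_loop : List Char → Int → List (List Char) → List Char → List (List Char) × List Char
  | [], _, fields, cur => (fields, cur)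
  | c :: rest, d, fields, cur =>
    if c = '(' then splitA_loop rest (d + 1) fields (cur ++ [c])
    else if c = ')' then splitA_loop rest (d - 1) fields (cur ++ [c])
    else if c = ',' ∧ d = 0 then splitA_loop rest d (fields ++ [PySem.Chars.strip cur]) []
    else splitA_loop rest d fields (cur ++ [c])

def split_sql_fields_py (text : String) : List String :=
  let p := splitA_loop text.toList 0 [] []
  let fields := if PySem.Chars.strip p.2 ≠ [] then p.1 ++ [PySem.Chars.strip p.2] else p.1
  fields.map String.ofList

-- ===== PORT B =====
-- the `for i, ch in enumerate(s)` scan of _split_top: index of the first comma at depth 0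
def findCut : List Char → Int → Option Nat
  | [], _ => none
  | c :: rest, d =>
    if c = '(' then (findCut rest (d + 1)).map (· + 1)
    else if c = ')' then (findCut rest (d - 1)).map (· + 1)
    else if c = ',' ∧ d = 0 then some 0
    else (findCut rest d).map (· + 1)

theorem findCut_lt : ∀ (s : List Char) (d : Int) (i : Nat), findCut s d = some i → i < s.length := by
  intro s
  induction s with
  | nil => intro d i h; simp [findCut] at h
  | cons c rest ih =>
    intro d i h
    simp only [findCut] at h
    split_ifs at h <;>
      first
        | (simp only [Option.map_eq_some_iff] at h
           obtain ⟨j, hj, rfl⟩ := h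
           have := ih _ _ hj
           simp; omega)
        | (cases h; simp)

-- _split_top: [s[:i]] + _split_top(s[i+1:]) at the first top-level comma, else [s]
def splitTop (s : List Char) : List (List Char) :=
  match h : findCut s 0 with
  | some i => s.take i :: splitTop (s.drop (i + 1))
  | none => [s]
termination_by s.length
decreasing_by
  have := findCut_lt s 0 i h
  simp
  omega

def split_sql_fields_py_alt (text : String) : List String :=
  let segs := (splitTop text.toList).map (fun p => PySem.Chars.strip p)
  let out := if segs.getLastD [] ≠ [] then segs else segs.dropLast
  out.map String.ofList

-- ===== PRECONDITION & SPEC =====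
def Spec_split_sql_fields_py (text : String) (out : List String) : Prop := out = split_sql_fields_py_alt text
instance (text : String) (out : List String) : Decidable (Spec_split_sql_fields_py text out) := by unfold Spec_split_sql_fields_py; infer_instance

-- ===== CLAIM (what is proved, stated in full; the proofs are below) =====
def Claim_equal_split_sql_fields_py : Prop := ∀ (text : String), Dom_split_sql_fields_py text → Spec_split_sql_fields_py text (split_sql_fields_py text)

-- ===== LEMMAS AND PROOFS =====

-- A's finalization and B's last-field rule, on the char-list level
def afin (p : List (List Char) × List Char) : List (List Char) :=
  if PySem.Chars.strip p.2 ≠ [] then p.1 ++ [PySem.Chars.strip p.2] else p.1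

def bfin (segs : List (List Char)) : List (List Char) :=
  if segs.getLastD [] ≠ [] then segs else segs.dropLast

theorem splitTop_ne_nil (s : List Char) : splitTop s ≠ [] := by
  rw [splitTop]
  split <;> simp

theorem bfin_cons (x : List Char) (xs : List (List Char)) (h : xs ≠ []) :
    bfin (x :: xs) = x :: bfin xs := by
  obtain ⟨y, hy⟩ : ∃ y, xs.getLast? = some y := by
    cases e : xs.getLast? with
    | none => exact absurd (List.getLast?_eq_none_iff.mp e) h
    | some y => exact ⟨y, rfl⟩
  unfold bfin
  rw [List.getLastD_cons, List.dropLast_cons_of_ne_nil h,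
      List.getLastD_eq_getLast?, List.getLastD_eq_getLast?, hy]
  simp only [Option.getD_some]
  split <;> rfl

theorem splitTop_cons (s : List Char) :
    (splitTop s).headI :: (splitTop s).tail = splitTop s := by
  cases hsp : splitTop s with
  | nil => exact absurd hsp (splitTop_ne_nil s)
  | cons a as => simp

-- L1: with no top-level comma ahead, the loop just appends every char to current_field
theorem loop_no_cut : ∀ (s : List Char) (d : Int) (fields : List (List Char)) (cur : List Char),
    findCut s d = none → splitA_loop s d fields cur = (fields, cur ++ s) := by
  intro s
  induction s with
  | nil => intro d fields cur _; simp [splitA_loop]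
  | cons c rest ih =>
    intro d fields cur h
    simp only [findCut] at h
    simp only [splitA_loop]
    split_ifs at h ⊢ with h1 h2 h3
    · rw [ih _ _ _ (Option.map_eq_none_iff.mp h)]; simp
    · rw [ih _ _ _ (Option.map_eq_none_iff.mp h)]; simp
    · rw [ih _ _ _ (Option.map_eq_none_iff.mp h)]; simp

-- L2: at the first top-level comma (index i), the loop flushes strip(cur ++ s[:i]) and restarts
theorem loop_cut : ∀ (s : List Char) (d : Int) (i : Nat) (fields : List (List Char)) (cur : List Char),
    findCut s d = some i →
    splitA_loop s d fields cur =
      splitA_loop (s.drop (i + 1)) 0 (fields ++ [PySem.Chars.strip (cur ++ s.take i)]) [] := by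
  intro s
  induction s with
  | nil => intro d i fields cur h; simp [findCut] at h
  | cons c rest ih =>
    intro d i fields cur h
    simp only [findCut] at h
    simp only [splitA_loop]
    split_ifs at h ⊢ with h1 h2 h3
    · obtain ⟨j, hj, rfl⟩ := Option.map_eq_some_iff.mp h
      rw [ih _ _ _ _ hj]; simp
    · obtain ⟨j, hj, rfl⟩ := Option.map_eq_some_iff.mp h
      rw [ih _ _ _ _ hj]; simp
    · cases h
      simp [h3.2]
    · obtain ⟨j, hj, rfl⟩ := Option.map_eq_some_iff.mp h
      rw [ih _ _ _ _ hj]; simp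

-- main invariant: the finalized loop result is fields ++ B's answer (with cur glued onto the first raw segment)
theorem main_aux : ∀ (n : ℕ) (s : List Char), s.length ≤ n →
    ∀ (fields : List (List Char)) (cur : List Char),
    afin (splitA_loop s 0 fields cur) =
      fields ++ bfin (((cur ++ (splitTop s).headI) :: (splitTop s).tail).map PySem.Chars.strip) := by
  intro n
  induction n with
  | zero =>
    intro s hs fields cur
    have : s = [] := List.length_eq_zero_iff.mp (Nat.le_zero.mp hs)
    subst this
    simp [splitA_loop, splitTop, findCut, afin, bfin]
    split <;> simp
  | succ n ih =>
    intro s hs fields cur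
    rw [splitTop]
    cases h : findCut s 0 with
    | none =>
      rw [loop_no_cut s 0 fields cur h]
      simp only [List.headI, List.tail, List.map, afin, bfin]
      split <;> simp_all
    | some i =>
      have hi := findCut_lt s 0 i h
      rw [loop_cut s 0 i fields cur h]
      rw [ih (s.drop (i + 1)) (by simp; omega) (fields ++ [PySem.Chars.strip (cur ++ s.take i)]) []]
      simp only [List.nil_append]
      rw [splitTop_cons]
      simp only [List.headI, List.tail, List.map]
      rw [bfin_cons _ _ (by
        cases hsp : splitTop (s.drop (i + 1)) with
        | nil => exact absurd hsp (splitTop_ne_nil _)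
        | cons a as => simp)]
      simp

theorem ports_agree (text : String) :
    split_sql_fields_py text = split_sql_fields_py_alt text := by
  have h := main_aux (text.toList.length) text.toList le_rfl [] []
  simp only [List.nil_append] at h
  rw [splitTop_cons] at h
  show List.map String.ofList (afin (splitA_loop text.toList 0 [] [])) =
    List.map String.ofList (bfin ((splitTop text.toList).map (fun p => PySem.Chars.strip p)))
  rw [h]

-- ===== VERDICT (by name: the statement is the Claim_ definition above) =====
theorem split_sql_fields_py_spec : Claim_equal_split_sql_fields_py := by
  intro text _
  exact ports_agree text
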